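-- pv_equiv track=rewrite | github.com/nailaidi/AIge_Of_EmpAIre-na | Buildings.py | prochain_id_batiment
-- ===== SOURCE A (Python) =====
-- def prochain_id_batiment(joueur, batiment, tuiles):
--     """
--     Trouve le prochain identifiant disponible sous la forme f"{batiment}{i}" pour un joueur donné.
--     """
--     ids_existants = set()
--
--     # Parcourt toutes les tuiles pour trouver les IDs existants pour le joueur et le bâtiment
--     for position, data in tuiles.items():
--         if 'batiments' in data and joueur in data['batiments']:
--             for b, info in data['batiments'][joueur].items():
--                 if b == batiment and 'id' in info:
--                     ids_existants.add(info['id'])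
--
--     numeros_existants = {
--         int(id[len(batiment):]) for id in ids_existants
--         if id.startswith(batiment) and id[len(batiment):].isdigit()
--     }
--
--     # Trouver le plus petit numéro non utilisé
--     prochain_numero = 0
--     while prochain_numero in numeros_existants:
--         prochain_numero += 1
--
--     # Retourner l'identifiant au format f"{batiment}{i}"
--     return f"{batiment}{prochain_numero}"
-- ===== SOURCE B (Python) =====
-- def _id_de_tuile(joueur, batiment, data):
--     # Direct dictionary lookups instead of scanning items: at most one entry
--     # per key exists, so data['batiments'][joueur][batiment] is the only candidate.
--     info = data.get('batiments', {}).get(joueur, {}).get(batiment)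
--     if info is not None and 'id' in info:
--         return info['id']
--     return None
--
--
-- def prochain_id_batiment(joueur, batiment, tuiles):
--     """
--     Trouve le prochain identifiant disponible sous la forme f"{batiment}{i}" pour un joueur donné.
--     """
--     k = len(batiment)
--     ids = (_id_de_tuile(joueur, batiment, data) for data in tuiles.values())
--     nums = {
--         int(i[k:]) for i in ids
--         if i is not None and i.startswith(batiment) and i[k:].isdigit()
--     }
--     # smallest unused number: sort the distinct numbers and scan for the first gap
--     expected = 0
--     for n in sorted(nums):
--         if n == expected:
--             expected += 1
--         elif n > expected:
--             break
--     return f"{batiment}{expected}"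
-- ===== Notes on version B (the rewrite author's own statement) =====
-- stated objective: alternative
-- what changed: B replaces A's nested loops over dict items by a direct data.get('batiments',{}).get(joueur,{}).get(batiment) lookup chain per tile (keys are unique, so the scan is redundant), collects the parsed numeric suffixes with a set comprehension over that lookup pipeline, and finds the smallest unused number by sorting the distinct numbers and scanning for the first gap instead of A's while-loop membership probe from 0.
import Mathlib
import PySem

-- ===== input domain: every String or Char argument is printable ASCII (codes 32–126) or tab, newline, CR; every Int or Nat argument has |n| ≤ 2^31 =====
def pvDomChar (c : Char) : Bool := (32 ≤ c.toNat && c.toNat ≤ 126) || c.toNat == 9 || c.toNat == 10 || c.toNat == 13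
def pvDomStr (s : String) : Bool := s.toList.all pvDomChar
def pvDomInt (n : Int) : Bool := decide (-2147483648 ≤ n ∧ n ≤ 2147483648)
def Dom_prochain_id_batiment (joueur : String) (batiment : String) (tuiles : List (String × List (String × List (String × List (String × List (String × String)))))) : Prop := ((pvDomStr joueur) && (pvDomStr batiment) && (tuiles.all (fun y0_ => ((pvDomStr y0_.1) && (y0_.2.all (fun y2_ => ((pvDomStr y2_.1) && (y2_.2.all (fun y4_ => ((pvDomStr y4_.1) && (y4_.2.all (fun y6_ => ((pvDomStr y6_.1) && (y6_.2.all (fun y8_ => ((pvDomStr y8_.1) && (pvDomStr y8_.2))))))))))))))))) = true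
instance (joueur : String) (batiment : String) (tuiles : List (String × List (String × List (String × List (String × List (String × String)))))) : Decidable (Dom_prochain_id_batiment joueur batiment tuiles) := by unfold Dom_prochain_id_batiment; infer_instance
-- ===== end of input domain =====

-- B replaces A's nested item-loops by one direct get-chain lookup per tile (dict keys are
-- unique), builds the parsed-suffix set in one comprehension, and computes the smallest
-- unused number by sort-then-gap-scan instead of a membership while-loop; objective: alternative.

-- ===== PORT A =====
-- the inner 'for b, info in data['batiments'][joueur].items()' loop body
def pvInnerA (batiment : String) (ids : PySem.Set String) (bi : String × List (String × String)) : PySem.Set String :=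
  if bi.1 == batiment && (PySem.Dict.ofList bi.2).contains "id" then
    PySem.Set.add ids ((PySem.Dict.ofList bi.2).getD "id" "")
  else ids

-- the outer 'for position, data in tuiles.items()' loop body
def pvOuterA (joueur : String) (batiment : String) (ids : PySem.Set String)
    (pd : String × List (String × List (String × List (String × List (String × String))))) : PySem.Set String :=
  let data := PySem.Dict.ofList pd.2
  if data.contains "batiments" && (PySem.Dict.ofList (data.getD "batiments" [])).contains joueur then
    (PySem.Dict.ofList ((PySem.Dict.ofList (data.getD "batiments" [])).getD joueur [])).items.foldl
      (pvInnerA batiment) ids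
  else ids

-- 'while prochain_numero in numeros_existants: prochain_numero += 1' (fuel |s|+1 always suffices: pvWhileMex_spec)
def pvWhileMex (s : PySem.Set Int) : Nat → Int → Int
  | 0, n => n
  | fuel+1, n => if PySem.Set.contains s n then pvWhileMex s fuel (n+1) else n

def prochain_id_batiment (joueur : String) (batiment : String) (tuiles : List (String × List (String × List (String × List (String × List (String × String)))))) : String :=
  let ids_existants := (PySem.Dict.ofList tuiles).items.foldl (pvOuterA joueur batiment) PySem.Set.empty
  let numeros_existants : PySem.Set Int := PySem.Set.ofList
    ((ids_existants.filter (fun id => PySem.Str.startswith id batiment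
        && PySem.Chars.strIsdigit (id.toList.drop batiment.toList.length))).map
      (fun id => (PySem.Int.ofChars? (id.toList.drop batiment.toList.length)).getD 0))
  batiment ++ PySem.Int.toStr (pvWhileMex numeros_existants (numeros_existants.length + 1) 0)

-- ===== PORT B =====
-- "_id_de_tuile": data.get('batiments', {}).get(joueur, {}).get(batiment), then info.get('id') if present
def pvTileId (joueur : String) (batiment : String)
    (data : List (String × List (String × List (String × List (String × String))))) : Option String :=
  ((PySem.Dict.ofList ((PySem.Dict.ofList ((PySem.Dict.ofList data).getD "batiments" [])).getD joueur [])).get? batiment).bind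
    (fun info => (PySem.Dict.ofList info).get? "id")

-- 'for n in sorted(nums): …' — gap scan with break
def pvScanMex : List Int → Int → Int
  | [], e => e
  | n :: rest, e => if n == e then pvScanMex rest (e + 1) else if e < n then e else pvScanMex rest e

def prochain_id_batiment_alt (joueur : String) (batiment : String) (tuiles : List (String × List (String × List (String × List (String × List (String × String)))))) : String :=
  let ids : List String := (PySem.Dict.ofList tuiles).items.filterMap (fun pd => pvTileId joueur batiment pd.2)
  let nums : PySem.Set Int := PySem.Set.ofList
    ((ids.filter (fun i => PySem.Str.startswith i batiment
        && PySem.Chars.strIsdigit (i.toList.drop batiment.toList.length))).map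
      (fun i => (PySem.Int.ofChars? (i.toList.drop batiment.toList.length)).getD 0))
  batiment ++ PySem.Int.toStr (pvScanMex (PySem.List.sorted nums (fun x => x) false) 0)

-- ===== PRECONDITION & SPEC =====
def Spec_prochain_id_batiment (joueur : String) (batiment : String) (tuiles : List (String × List (String × List (String × List (String × List (String × String)))))) (out : String) : Prop := out = prochain_id_batiment_alt joueur batiment tuiles
instance (joueur : String) (batiment : String) (tuiles : List (String × List (String × List (String × List (String × List (String × String)))))) (out : String) : Decidable (Spec_prochain_id_batiment joueur batiment tuiles out) := by unfold Spec_prochain_id_batiment; infer_instance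

-- ===== CLAIM (what is proved, stated in full; the proofs are below) =====
def Claim_equal_prochain_id_batiment : Prop := ∀ (joueur : String) (batiment : String) (tuiles : List (String × List (String × List (String × List (String × List (String × String)))))), Dom_prochain_id_batiment joueur batiment tuiles → Spec_prochain_id_batiment joueur batiment tuiles (prochain_id_batiment joueur batiment tuiles)

-- ===== LEMMAS AND PROOFS =====

-- per-item: what A's inner loop body adds
theorem pvInnerA_mem (batiment : String) (s : PySem.Set String) (bi : String × List (String × String)) (x : String) :
    x ∈ pvInnerA batiment s bi ↔ x ∈ s ∨ (bi.1 = batiment ∧ (PySem.Dict.ofList bi.2).get? "id" = some x) := by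
  unfold pvInnerA
  by_cases hb : bi.1 = batiment
  · by_cases hc : (PySem.Dict.ofList bi.2).contains "id" = true
    · obtain ⟨v, hv⟩ : ∃ v, (PySem.Dict.ofList bi.2).get? "id" = some v := by
        rw [PySem.Dict.contains_eq_isSome_get?] at hc
        exact Option.isSome_iff_exists.1 hc
      simp only [hb, hc, PySem.Set.mem_add, PySem.Dict.getD_eq_get?_getD, hv, beq_self_eq_true,
        Bool.and_self, if_true, Option.getD_some, Option.some.injEq, true_and]
      exact or_congr Iff.rfl eq_comm
    · have : (PySem.Dict.ofList bi.2).get? "id" = none := by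
        rw [PySem.Dict.contains_eq_isSome_get?] at hc
        simpa using hc
      simp [hb, hc, this]
  · simp [hb]

-- A's inner foldl collects exactly the ids of matching items
theorem pvInnerA_fold_mem (batiment : String) (items : List (String × List (String × String)))
    (s : PySem.Set String) (x : String) :
    x ∈ items.foldl (pvInnerA batiment) s ↔
      x ∈ s ∨ ∃ p ∈ items, p.1 = batiment ∧ (PySem.Dict.ofList p.2).get? "id" = some x := by
  induction items generalizing s with
  | nil => simp
  | cons bi rest ih =>
    rw [List.foldl_cons, ih, pvInnerA_mem]
    constructor
    · rintro ((h | h) | ⟨p, hp, h⟩)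
      · exact Or.inl h
      · exact Or.inr ⟨bi, List.mem_cons_self, h⟩
      · exact Or.inr ⟨p, List.mem_cons_of_mem _ hp, h⟩
    · rintro (h | ⟨p, hp, h⟩)
      · exact Or.inl (Or.inl h)
      · rcases List.mem_cons.1 hp with rfl | hp'
        · exact Or.inl (Or.inr h)
        · exact Or.inr ⟨p, hp', h⟩

-- on a dict built by Dict.ofList (unique keys), "some matching item yields x" = "the lookup chain yields x"
theorem pvTile_mem (joueur batiment : String)
    (data : List (String × List (String × List (String × List (String × String))))) (x : String) :
    (∃ p ∈ (PySem.Dict.ofList ((PySem.Dict.ofList ((PySem.Dict.ofList data).getD "batiments" [])).getD joueur [])).items,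
        p.1 = batiment ∧ (PySem.Dict.ofList p.2).get? "id" = some x) ↔
      pvTileId joueur batiment data = some x := by
  unfold pvTileId
  set d := PySem.Dict.ofList ((PySem.Dict.ofList ((PySem.Dict.ofList data).getD "batiments" [])).getD joueur []) with hd
  have hnd : d.keys.Nodup := PySem.Dict.nodup_keys_ofList _
  constructor
  · rintro ⟨p, hp, h1, h2⟩
    have : d.get? batiment = some p.2 := by
      rw [PySem.Dict.get?_eq_some_iff_mem_items d _ _ hnd]
      exact h1 ▸ hp
    rw [this]
    exact h2
  · intro h
    rw [Option.bind_eq_some_iff] at h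
    obtain ⟨info, h1, h2⟩ := h
    exact ⟨(batiment, info), (PySem.Dict.get?_eq_some_iff_mem_items d _ _ hnd).1 h1, rfl, h2⟩

-- per-tile: A's outer loop body adds exactly the lookup-chain result
theorem pvOuterA_mem (joueur batiment : String) (s : PySem.Set String)
    (pd : String × List (String × List (String × List (String × List (String × String))))) (x : String) :
    x ∈ pvOuterA joueur batiment s pd ↔ x ∈ s ∨ pvTileId joueur batiment pd.2 = some x := by
  unfold pvOuterA
  by_cases hc : ((PySem.Dict.ofList pd.2).contains "batiments"
      && (PySem.Dict.ofList ((PySem.Dict.ofList pd.2).getD "batiments" [])).contains joueur) = true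
  · simp only [hc, if_true]
    rw [pvInnerA_fold_mem, pvTile_mem]
  · simp only [hc, Bool.false_eq_true, if_false]
    have hnone : pvTileId joueur batiment pd.2 = none := by
      rw [Bool.and_eq_true, not_and_or, Bool.not_eq_true, Bool.not_eq_true] at hc
      unfold pvTileId
      rcases hc with hc | hc
      · rw [PySem.Dict.getD_of_not_contains _ _ hc]
        rfl
      · rw [PySem.Dict.getD_of_not_contains _ _ hc]
        rfl
    simp [hnone]

-- A's whole collection fold = B's filterMap pipeline, membership-wise
theorem pvCollect_mem (joueur batiment : String)
    (items : List (String × List (String × List (String × List (String × List (String × String))))))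
    (s : PySem.Set String) (x : String) :
    x ∈ items.foldl (pvOuterA joueur batiment) s ↔
      x ∈ s ∨ x ∈ items.filterMap (fun pd => pvTileId joueur batiment pd.2) := by
  induction items generalizing s with
  | nil => simp
  | cons pd rest ih =>
    rw [List.foldl_cons, ih]
    simp only [pvOuterA_mem, List.filterMap_cons]
    cases h : pvTileId joueur batiment pd.2 with
    | none => simp
    | some v =>
      simp only [List.mem_cons, Option.some.injEq]
      tauto

-- pvWhileMex with enough fuel returns the least m ≥ n not in s
theorem pvWhileMex_step (s : PySem.Set Int) (fuel : Nat) (n : Int)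
    (hex : ∃ m : Int, n ≤ m ∧ m < n + fuel ∧ m ∉ s) :
    n ≤ pvWhileMex s fuel n ∧ pvWhileMex s fuel n ∉ s ∧
      ∀ k : Int, n ≤ k → k < pvWhileMex s fuel n → k ∈ s := by
  induction fuel generalizing n with
  | zero => obtain ⟨m, h1, h2, _⟩ := hex; omega
  | succ fuel ih =>
    by_cases hn : n ∈ s
    · have hc : PySem.Set.contains s n = true := by simp [PySem.Set.contains, hn]
      have hrec := ih (n + 1) (by
        obtain ⟨m, h1, h2, h3⟩ := hex
        exact ⟨m, by rcases eq_or_lt_of_le h1 with rfl | h' <;> [exact absurd hn h3; omega],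
          by push_cast at h2 ⊢; omega, h3⟩)
      simp only [pvWhileMex, hc, if_true]
      refine ⟨by omega, hrec.2.1, fun k hk1 hk2 => ?_⟩
      rcases eq_or_lt_of_le hk1 with rfl | h'
      · exact hn
      · exact hrec.2.2 k (by omega) hk2
    · have hc : PySem.Set.contains s n = false := by simp [PySem.Set.contains, hn]
      simp only [pvWhileMex, hc, Bool.false_eq_true, if_false]
      exact ⟨le_refl n, hn, fun k hk1 hk2 => absurd hk2 (by omega)⟩

theorem pvWhileMex_spec (s : PySem.Set Int) (_hnd : s.Nodup) :
    0 ≤ pvWhileMex s (s.length + 1) 0 ∧ pvWhileMex s (s.length + 1) 0 ∉ s ∧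
      ∀ k : Int, 0 ≤ k → k < pvWhileMex s (s.length + 1) 0 → k ∈ s := by
  refine pvWhileMex_step s (s.length + 1) 0 ?_
  by_contra hno
  push Not at hno
  have hsub : ((List.range (s.length + 1)).map (Nat.cast : Nat → Int)) ⊆ s := by
    intro a ha
    simp only [List.mem_map, List.mem_range] at ha
    obtain ⟨j, hj, rfl⟩ := ha
    exact hno _ (by positivity) (by push_cast; omega)
  have hndr : ((List.range (s.length + 1)).map (Nat.cast : Nat → Int)).Nodup :=
    (List.nodup_range).map (fun a b => by omega)
  have hlen : ((List.range (s.length + 1)).map (Nat.cast : Nat → Int)).length ≤ s.length := by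
    calc ((List.range (s.length + 1)).map (Nat.cast : Nat → Int)).length
        = ((List.range (s.length + 1)).map (Nat.cast : Nat → Int)).toFinset.card :=
          (List.toFinset_card_of_nodup hndr).symm
      _ ≤ s.toFinset.card := Finset.card_le_card (fun a ha => by
          simp only [List.mem_toFinset] at *; exact hsub ha)
      _ ≤ s.length := s.toFinset_card_le
  simp at hlen

theorem pvScanMex_spec (l : List Int) (hs : l.Pairwise (· < ·)) (e : Int) :
    e ≤ pvScanMex l e ∧ pvScanMex l e ∉ l ∧
      ∀ k : Int, e ≤ k → k < pvScanMex l e → k ∈ l := by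
  induction l generalizing e with
  | nil =>
    refine ⟨le_refl e, List.not_mem_nil, fun k h1 h2 => ?_⟩
    simp only [pvScanMex] at h2; omega
  | cons n rest ih =>
    have hn : ∀ x ∈ rest, n < x := (List.pairwise_cons.1 hs).1
    have hrest := List.Pairwise.of_cons hs
    by_cases he : n = e
    · have hb : (n == e) = true := by simp [he]
      simp only [pvScanMex, hb, if_true]
      obtain ⟨h1, h2, h3⟩ := ih hrest (e + 1)
      refine ⟨by omega, ?_, fun k hk1 hk2 => ?_⟩
      · simp only [List.mem_cons, not_or]
        exact ⟨by omega, h2⟩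
      · rcases eq_or_lt_of_le hk1 with rfl | h'
        · exact List.mem_cons.2 (Or.inl he.symm)
        · exact List.mem_cons_of_mem n (h3 k (by omega) hk2)
    · have hb : (n == e) = false := by simp [he]
      simp only [pvScanMex, hb, Bool.false_eq_true, if_false]
      by_cases hlt : e < n
      · simp only [hlt, if_true]
        refine ⟨le_refl e, ?_, fun k h1 h2 => absurd h2 (by omega)⟩
        simp only [List.mem_cons, not_or]
        exact ⟨by omega, fun hmem => by have := hn e hmem; omega⟩
      · simp only [hlt, if_false]
        obtain ⟨h1, h2, h3⟩ := ih hrest e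
        refine ⟨h1, ?_, fun k hk1 hk2 => List.mem_cons_of_mem n (h3 k hk1 hk2)⟩
        simp only [List.mem_cons, not_or]
        exact ⟨by omega, h2⟩

-- ===== VERDICT (by name: the statement is the Claim_ definition above) =====
theorem prochain_id_batiment_spec : Claim_equal_prochain_id_batiment := by
  intro joueur batiment tuiles _
  unfold Spec_prochain_id_batiment prochain_id_batiment prochain_id_batiment_alt
  set items := (PySem.Dict.ofList tuiles).items with hitems
  set idsA := items.foldl (pvOuterA joueur batiment) PySem.Set.empty with hidsA
  set idsB := items.filterMap (fun pd => pvTileId joueur batiment pd.2) with hidsB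
  have hids : ∀ x, x ∈ idsA ↔ x ∈ idsB := by
    intro x
    rw [hidsA, hidsB, pvCollect_mem]
    simp [PySem.Set.empty]
  set S : PySem.Set Int := PySem.Set.ofList
    ((idsA.filter (fun id => PySem.Str.startswith id batiment
        && PySem.Chars.strIsdigit (id.toList.drop batiment.toList.length))).map
      (fun id => (PySem.Int.ofChars? (id.toList.drop batiment.toList.length)).getD 0)) with hS
  set L : List Int := PySem.List.sorted (PySem.Set.ofList
    ((idsB.filter (fun i => PySem.Str.startswith i batiment
        && PySem.Chars.strIsdigit (i.toList.drop batiment.toList.length))).map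
      (fun i => (PySem.Int.ofChars? (i.toList.drop batiment.toList.length)).getD 0))) (fun x => x) false with hL
  have hmem : ∀ m : Int, m ∈ S ↔ m ∈ L := by
    intro m
    rw [hS, hL, PySem.Set.mem_ofList, PySem.List.mem_sorted, PySem.Set.mem_ofList]
    simp only [List.mem_map, List.mem_filter]
    constructor
    · rintro ⟨id, ⟨hid, hok⟩, hp⟩; exact ⟨id, ⟨(hids id).1 hid, hok⟩, hp⟩
    · rintro ⟨id, ⟨hid, hok⟩, hp⟩; exact ⟨id, ⟨(hids id).2 hid, hok⟩, hp⟩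
  obtain ⟨ha0, ha1, ha2⟩ := pvWhileMex_spec S (PySem.Set.nodup_ofList _)
  obtain ⟨hb0, hb1, hb2⟩ := pvScanMex_spec L (PySem.List.sorted_ofList_pairwise_lt _) 0
  have key : pvWhileMex S (S.length + 1) 0 = pvScanMex L 0 := by
    rcases lt_trichotomy (pvWhileMex S (S.length + 1) 0) (pvScanMex L 0) with h | h | h
    · exact absurd ((hmem _).2 (hb2 _ ha0 h)) ha1
    · exact h
    · exact absurd ((hmem _).1 (ha2 _ hb0 h)) hb1
  show batiment ++ PySem.Int.toStr (pvWhileMex S (S.length + 1) 0)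
      = batiment ++ PySem.Int.toStr (pvScanMex L 0)
  rw [key]
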